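-- pv_equiv track=rewrite | github.com/kh277/BOJ | 백준/Silver/11540. Competition/Competition.py | solve
-- ===== SOURCE A (Python) =====
-- def solve(N, solveA, solveB):
--     canSolve = [solveA, solveB]
--     revCount1 = 0
--     revCount2 = 0
--     curUse1 = 0
--     curUse2 = 1
--     for i in sorted(solveA | solveB):
--         if i not in canSolve[curUse1] and i in canSolve[curUse1^1]:
--             curUse1 ^= 1
--             revCount1 += 1
--         if i not in canSolve[curUse2] and i in canSolve[curUse2^1]:
--             curUse2 ^= 1
--             revCount2 += 1
--
--     return min(revCount1, revCount2)
-- ===== SOURCE B (Python) =====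
-- def solve(N, solveA, solveB):
--     # Sequence of owners (0 = only A, 1 = only B) over the sorted union,
--     # skipping problems both can solve; the answer is the number of
--     # adjacent owner changes in that sequence.
--     owners = [0 if x in solveA else 1
--               for x in sorted(solveA | solveB)
--               if (x in solveA) != (x in solveB)]
--     return sum(1 for p, q in zip(owners, owners[1:]) if p != q)
-- ===== Notes on version B (the rewrite author's own statement) =====
-- stated objective: simpler
-- what changed: Replaced A's dual state-machine simulation (two cur/revCount pairs advanced in lockstep, then min) by filtering the sorted union down to a single 'owner' sequence (0 = only in solveA, 1 = only in solveB) and counting adjacent owner changes.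
import Mathlib
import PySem

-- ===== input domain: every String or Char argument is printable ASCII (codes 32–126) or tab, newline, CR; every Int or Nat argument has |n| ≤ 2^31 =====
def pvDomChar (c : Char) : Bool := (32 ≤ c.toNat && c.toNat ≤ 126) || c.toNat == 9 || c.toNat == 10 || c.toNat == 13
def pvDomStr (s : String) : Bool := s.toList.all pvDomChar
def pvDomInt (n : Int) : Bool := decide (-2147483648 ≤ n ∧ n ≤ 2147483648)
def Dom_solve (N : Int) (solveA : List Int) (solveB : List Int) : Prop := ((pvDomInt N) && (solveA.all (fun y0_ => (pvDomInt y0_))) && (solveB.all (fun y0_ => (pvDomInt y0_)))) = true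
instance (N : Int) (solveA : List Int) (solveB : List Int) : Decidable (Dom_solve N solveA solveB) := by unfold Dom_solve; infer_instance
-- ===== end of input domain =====

-- B replaces A's dual state-machine simulation + min by counting adjacent owner changes
-- over the filtered sorted union (objective: simpler).

-- ===== PORT A =====
-- loop body of A: the two (curUse, revCount) updates for one element i
def pvStepA (solveA : List Int) (solveB : List Int)
    (st : Nat × Nat × Int × Int) (i : Int) : Nat × Nat × Int × Int :=
  let canSolve : List (List Int) := [solveA, solveB]
  let p1 : Nat × Int :=
    if i ∉ canSolve.getD st.1 [] ∧ i ∈ canSolve.getD (st.1 ^^^ 1) [] then (st.1 ^^^ 1, st.2.2.1 + 1)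
    else (st.1, st.2.2.1)
  let p2 : Nat × Int :=
    if i ∉ canSolve.getD st.2.1 [] ∧ i ∈ canSolve.getD (st.2.1 ^^^ 1) [] then (st.2.1 ^^^ 1, st.2.2.2 + 1)
    else (st.2.1, st.2.2.2)
  (p1.1, p2.1, p1.2, p2.2)

def solve (N : Int) (solveA : List Int) (solveB : List Int) : Int :=
  let s := (PySem.List.sorted (PySem.Set.union (PySem.Set.ofList solveA) solveB) (fun x => x) false).foldl
    (pvStepA solveA solveB) (0, 1, 0, 0)
  min s.2.2.1 s.2.2.2

-- ===== PORT B =====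
-- B's classifier: some 0 (only in solveA), some 1 (only in solveB), none otherwise
def pvOwn (solveA : List Int) (solveB : List Int) (x : Int) : Option Int :=
  if (decide (x ∈ solveA)) ≠ (decide (x ∈ solveB)) then some (if x ∈ solveA then (0 : Int) else 1) else none

def solve_alt (N : Int) (solveA : List Int) (solveB : List Int) : Int :=
  let owners := (PySem.List.sorted (PySem.Set.union (PySem.Set.ofList solveA) solveB) (fun x => x) false).filterMap
    (pvOwn solveA solveB)
  (owners.zip (owners.drop 1)).foldl (fun acc pq => if pq.1 ≠ pq.2 then acc + 1 else acc) 0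

-- ===== PRECONDITION & SPEC =====
def Spec_solve (N : Int) (solveA : List Int) (solveB : List Int) (out : Int) : Prop := out = solve_alt N solveA solveB
instance (N : Int) (solveA : List Int) (solveB : List Int) (out : Int) : Decidable (Spec_solve N solveA solveB out) := by unfold Spec_solve; infer_instance

-- ===== CLAIM (what is proved, stated in full; the proofs are below) =====
def Claim_equal_solve : Prop := ∀ (N : Int) (solveA : List Int) (solveB : List Int), Dom_solve N solveA solveB → Spec_solve N solveA solveB (solve N solveA solveB)

-- ===== LEMMAS AND PROOFS =====

-- number of owner changes in os, given previous owner p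
def pvTrans (p : Int) : List Int → Int
  | [] => 0
  | o :: os => (if o = p then 0 else 1) + pvTrans o os

theorem pvOwn_cases (sA sB : List Int) (x : Int) (o : Int)
    (h : pvOwn sA sB x = some o) : o = 0 ∨ o = 1 := by
  unfold pvOwn at h
  split_ifs at h <;> simp_all

-- one step of A, characterized by the element's owner
theorem pvStepA_char (sA sB : List Int) (x : Int) (c1 c2 : Nat) (r1 r2 : Int)
    (h1 : c1 = 0 ∨ c1 = 1) (h2 : c2 = 0 ∨ c2 = 1) :
    pvStepA sA sB (c1, c2, r1, r2) x =
      match pvOwn sA sB x with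
      | none => (c1, c2, r1, r2)
      | some o => (o.toNat, o.toNat,
                   r1 + (if o = (c1 : Int) then 0 else 1),
                   r2 + (if o = (c2 : Int) then 0 else 1)) := by
  by_cases ha : x ∈ sA <;> by_cases hb : x ∈ sB <;>
    rcases h1 with h1 | h1 <;> rcases h2 with h2 | h2 <;> subst h1 <;> subst h2 <;>
    simp [pvStepA, pvOwn, ha, hb]

-- A's joint fold: each simulator's counter grows by the owner changes from its current binding
theorem pv_fold_counts (sA sB : List Int) : ∀ (l : List Int) (c1 c2 : Nat) (r1 r2 : Int),
    (c1 = 0 ∨ c1 = 1) → (c2 = 0 ∨ c2 = 1) →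
    (l.foldl (pvStepA sA sB) (c1, c2, r1, r2)).2.2
      = (r1 + pvTrans (c1 : Int) (l.filterMap (pvOwn sA sB)),
         r2 + pvTrans (c2 : Int) (l.filterMap (pvOwn sA sB))) := by
  intro l
  induction l with
  | nil => intro c1 c2 r1 r2 h1 h2; simp [pvTrans]
  | cons x l ih =>
    intro c1 c2 r1 r2 h1 h2
    rw [List.foldl_cons, pvStepA_char sA sB x c1 c2 r1 r2 h1 h2, List.filterMap_cons]
    cases ho : pvOwn sA sB x with
    | none => simpa using ih c1 c2 r1 r2 h1 h2
    | some o =>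
      rcases pvOwn_cases sA sB x o ho with h | h <;> subst h <;>
        simp only [Int.toNat_zero, Int.toNat_one] <;>
        [rw [ih 0 0 _ _ (Or.inl rfl) (Or.inl rfl)]; rw [ih 1 1 _ _ (Or.inr rfl) (Or.inr rfl)]] <;>
        rcases h1 with h1 | h1 <;> rcases h2 with h2 | h2 <;> subst h1 <;> subst h2 <;>
        simp [pvTrans, Prod.ext_iff] <;> first | trivial | omega | ring

-- B's zip-fold counts exactly the owner changes
theorem pv_zipfold (os : List Int) : ∀ (p acc : Int),
    ((p :: os).zip os).foldl (fun acc pq => if pq.1 ≠ pq.2 then acc + 1 else acc) acc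
      = acc + pvTrans p os := by
  induction os with
  | nil => intro p acc; simp [pvTrans]
  | cons q os ih =>
    intro p acc
    simp only [List.zip_cons_cons, List.foldl_cons, pvTrans]
    rw [ih q]
    split_ifs <;> omega

-- every owner is 0 or 1
theorem pv_mem_owners (sA sB : List Int) (l : List Int) (o : Int)
    (h : o ∈ l.filterMap (pvOwn sA sB)) : o = 0 ∨ o = 1 := by
  rw [List.mem_filterMap] at h
  obtain ⟨x, _, hx⟩ := h
  exact pvOwn_cases sA sB x o hx

theorem solve_spec : Claim_equal_solve := by
  intro N sA sB _
  unfold Spec_solve solve solve_alt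
  simp only []
  set u := PySem.List.sorted (PySem.Set.union (PySem.Set.ofList sA) sB) (fun x => x) false with hu
  have hc := pv_fold_counts sA sB u 0 1 0 0 (Or.inl rfl) (Or.inr rfl)
  have h1 : (u.foldl (pvStepA sA sB) (0, 1, 0, 0)).2.2.1
      = 0 + pvTrans 0 (u.filterMap (pvOwn sA sB)) := by rw [show (u.foldl (pvStepA sA sB) (0, 1, 0, 0)).2.2.1 = ((u.foldl (pvStepA sA sB) (0, 1, 0, 0)).2.2).1 from rfl, hc]; norm_num
  have h2 : (u.foldl (pvStepA sA sB) (0, 1, 0, 0)).2.2.2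
      = 0 + pvTrans 1 (u.filterMap (pvOwn sA sB)) := by rw [show (u.foldl (pvStepA sA sB) (0, 1, 0, 0)).2.2.2 = ((u.foldl (pvStepA sA sB) (0, 1, 0, 0)).2.2).2 from rfl, hc]; norm_num
  rw [h1, h2]
  cases hos : u.filterMap (pvOwn sA sB) with
  | nil => simp [pvTrans]
  | cons p rest =>
    have hp : p = 0 ∨ p = 1 := pv_mem_owners sA sB u p (by rw [hos]; exact List.mem_cons_self)
    have hdrop : (p :: rest).drop 1 = rest := rfl
    rw [hdrop, pv_zipfold rest p 0]
    rcases hp with hp | hp <;> subst hp <;> simp [pvTrans]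

-- ===== VERDICT (by name: the statement is the Claim_ definition above) =====
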